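-- pv_equiv track=rewrite | github.com/NemuKei/market-stats-viewer | scripts/signals/sources/starto.py | _group_schedules_by_date_venue
-- ===== SOURCE A (Python) =====
-- from collections import defaultdict
--
-- def _group_schedules_by_date_venue(
--     schedules: list[tuple[str, str | None, str, str | None]]
-- ) -> dict[tuple[str, str], list[tuple[str, str | None, str, str | None]]]:
--     grouped: dict[
--         tuple[str, str], list[tuple[str, str | None, str, str | None]]
--     ] = defaultdict(list)
--     for date_raw, start_time, venue, prefecture in schedules:
--         event_date = date_raw.replace(".", "-")
--         venue_name = " ".join(venue.split())
--         if not event_date or not venue_name: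
--             continue
--         grouped[(event_date, venue_name)].append(
--             (event_date, start_time, venue_name, prefecture)
--         )
--     return dict(grouped)
-- ===== SOURCE B (Python) =====
-- def _group_schedules_by_date_venue(schedules):
--     # Pass 1: normalize and keep only valid rows.
--     items = []
--     for date_raw, start_time, venue, prefecture in schedules:
--         event_date = date_raw.replace(".", "-")
--         venue_name = " ".join(venue.split())
--         if event_date and venue_name:
--             items.append((event_date, start_time, venue_name, prefecture))
--     # Pass 2: keys in first-appearance order.
--     keys = []
--     for t in items:
--         k = (t[0], t[2])
--         if k not in keys:
--             keys.append(k)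
--     # Pass 3: one list per key by filtering.
--     return {k: [t for t in items if (t[0], t[2]) == k] for k in keys}
-- ===== Notes on version B (the rewrite author's own statement) =====
-- stated objective: alternative
-- what changed: Replaces the single-pass defaultdict accumulation with a three-pass decomposition: normalize-and-filter the rows into a list, collect keys in first-appearance order, then build each group by filtering the normalized list per key.
import Mathlib
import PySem

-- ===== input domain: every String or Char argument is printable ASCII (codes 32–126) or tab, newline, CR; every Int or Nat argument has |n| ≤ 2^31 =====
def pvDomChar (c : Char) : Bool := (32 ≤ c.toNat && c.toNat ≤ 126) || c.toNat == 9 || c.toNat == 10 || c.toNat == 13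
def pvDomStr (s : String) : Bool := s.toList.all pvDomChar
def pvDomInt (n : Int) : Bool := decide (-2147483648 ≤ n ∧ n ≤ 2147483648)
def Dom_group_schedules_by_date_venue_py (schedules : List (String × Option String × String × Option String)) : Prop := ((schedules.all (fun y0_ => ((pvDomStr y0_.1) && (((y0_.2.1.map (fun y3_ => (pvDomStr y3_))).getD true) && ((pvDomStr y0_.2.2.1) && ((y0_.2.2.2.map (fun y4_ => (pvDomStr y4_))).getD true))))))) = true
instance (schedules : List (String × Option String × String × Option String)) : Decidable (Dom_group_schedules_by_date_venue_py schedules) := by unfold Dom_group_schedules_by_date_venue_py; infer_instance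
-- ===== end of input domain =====

-- B replaces A's single-pass defaultdict accumulation by three passes (normalize+filter, first-appearance key dedup, per-key filter); objective: alternative structure, same result including key order.

-- ===== PORT A =====
-- dict[tuple[str,str], list] → PySem.Dict (String × String) (List …); the returned dict is its items
-- flattened to the convention's List (String × String × List …).
def group_schedules_by_date_venue_py (schedules : List (String × Option String × String × Option String)) : List (String × String × List (String × Option String × String × Option String)) :=
  ((schedules.foldl
      (fun (grouped : PySem.Dict (String × String) (List (String × Option String × String × Option String))) t =>
        let event_date := PySem.Str.replace t.1 "." "-"
        let venue_name := PySem.Str.join " " (PySem.Str.split₀ t.2.2.1)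
        if event_date = "" ∨ venue_name = "" then grouped
        else grouped.modify (event_date, venue_name) []
          (fun l => l ++ [(event_date, t.2.1, venue_name, t.2.2.2)]))
      PySem.Dict.empty).items).map (fun p => (p.1.1, p.1.2, p.2))

-- ===== PORT B =====
def group_schedules_by_date_venue_py_alt (schedules : List (String × Option String × String × Option String)) : List (String × String × List (String × Option String × String × Option String)) :=
  let items := schedules.foldl
    (fun acc t =>
      let event_date := PySem.Str.replace t.1 "." "-"
      let venue_name := PySem.Str.join " " (PySem.Str.split₀ t.2.2.1)
      if event_date ≠ "" ∧ venue_name ≠ "" then acc ++ [(event_date, t.2.1, venue_name, t.2.2.2)]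
      else acc) []
  let keys := items.foldl (fun ks t => PySem.Set.add ks (t.1, t.2.2.1)) []
  keys.map (fun k => (k.1, k.2, items.filter (fun t => (t.1, t.2.2.1) == k)))

-- ===== PRECONDITION & SPEC =====
def Spec_group_schedules_by_date_venue_py (schedules : List (String × Option String × String × Option String)) (out : List (String × String × List (String × Option String × String × Option String))) : Prop := out = group_schedules_by_date_venue_py_alt schedules
instance (schedules : List (String × Option String × String × Option String)) (out : List (String × String × List (String × Option String × String × Option String))) : Decidable (Spec_group_schedules_by_date_venue_py schedules out) := by
  unfold Spec_group_schedules_by_date_venue_py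
  haveI h1 : DecidableEq (List (String × Option String × String × Option String)) := inferInstance
  haveI h2 : DecidableEq (String × String × List (String × Option String × String × Option String)) := inferInstance
  infer_instance

-- ===== CLAIM (what is proved, stated in full; the proofs are below) =====
def Claim_equal_group_schedules_by_date_venue_py : Prop := ∀ (schedules : List (String × Option String × String × Option String)), Dom_group_schedules_by_date_venue_py schedules → Spec_group_schedules_by_date_venue_py schedules (group_schedules_by_date_venue_py schedules)

-- ===== LEMMAS AND PROOFS =====

-- the transformed row and its validity test
def pvRow (t : String × Option String × String × Option String) : String × Option String × String × Option String :=
  (PySem.Str.replace t.1 "." "-", t.2.1, PySem.Str.join " " (PySem.Str.split₀ t.2.2.1), t.2.2.2)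

def pvOk (t : String × Option String × String × Option String) : Bool :=
  decide (PySem.Str.replace t.1 "." "-" ≠ "" ∧ PySem.Str.join " " (PySem.Str.split₀ t.2.2.1) ≠ "")

def pvItems (schedules : List (String × Option String × String × Option String)) : List (String × Option String × String × Option String) :=
  (schedules.filter pvOk).map pvRow

def pvKey (t : String × Option String × String × Option String) : String × String := (t.1, t.2.2.1)

lemma pvItems_cons (t : String × Option String × String × Option String) (l : List (String × Option String × String × Option String)) :
    pvItems (t :: l) = if pvOk t then pvRow t :: pvItems l else pvItems l := by
  by_cases h : pvOk t <;> simp [pvItems, h]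

lemma b_items_fold (schedules : List (String × Option String × String × Option String))
    (acc : List (String × Option String × String × Option String)) :
    schedules.foldl
      (fun acc t =>
        let event_date := PySem.Str.replace t.1 "." "-"
        let venue_name := PySem.Str.join " " (PySem.Str.split₀ t.2.2.1)
        if event_date ≠ "" ∧ venue_name ≠ "" then acc ++ [(event_date, t.2.1, venue_name, t.2.2.2)]
        else acc) acc = acc ++ pvItems schedules := by
  induction schedules generalizing acc with
  | nil => simp [pvItems]
  | cons t l ih =>
    rw [pvItems_cons]
    by_cases h : pvOk t
    · have h' := of_decide_eq_true h
      simp only [List.foldl_cons, if_pos h', ih, h, if_pos, pvRow]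
      simp
    · have h' : ¬ (PySem.Str.replace t.1 "." "-" ≠ "" ∧ PySem.Str.join " " (PySem.Str.split₀ t.2.2.1) ≠ "") := by
        simpa [pvOk] using h
      simp only [List.foldl_cons, if_neg h', ih, h, if_neg, Bool.false_eq_true, not_false_iff]

lemma a_fold_eq (schedules : List (String × Option String × String × Option String))
    (d : PySem.Dict (String × String) (List (String × Option String × String × Option String))) :
    schedules.foldl
      (fun grouped t =>
        let event_date := PySem.Str.replace t.1 "." "-"
        let venue_name := PySem.Str.join " " (PySem.Str.split₀ t.2.2.1)
        if event_date = "" ∨ venue_name = "" then grouped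
        else grouped.modify (event_date, venue_name) []
          (fun l => l ++ [(event_date, t.2.1, venue_name, t.2.2.2)])) d
    = (pvItems schedules).foldl (fun d x => d.modify (pvKey x) [] (fun l => l ++ [x])) d := by
  induction schedules generalizing d with
  | nil => simp [pvItems]
  | cons t l ih =>
    rw [pvItems_cons]
    by_cases h : pvOk t
    · have h' := of_decide_eq_true h
      have hg : ¬ (PySem.Str.replace t.1 "." "-" = "" ∨ PySem.Str.join " " (PySem.Str.split₀ t.2.2.1) = "") := by
        tauto
      simp only [List.foldl_cons, if_neg hg, ih, h, if_pos]
      rfl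
    · have h' : ¬ (PySem.Str.replace t.1 "." "-" ≠ "" ∧ PySem.Str.join " " (PySem.Str.split₀ t.2.2.1) ≠ "") := by
        simpa [pvOk] using h
      have hg : PySem.Str.replace t.1 "." "-" = "" ∨ PySem.Str.join " " (PySem.Str.split₀ t.2.2.1) = "" := by
        tauto
      simp only [List.foldl_cons, if_pos hg, ih, h, Bool.false_eq_true, if_neg, not_false_iff]

lemma dict_side (items : List (String × Option String × String × Option String)) :
    (items.foldl (fun d x => d.modify (pvKey x) [] (fun l => l ++ [x]))
        (PySem.Dict.empty : PySem.Dict (String × String) (List (String × Option String × String × Option String)))).items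
    = (PySem.Set.update [] (items.map pvKey)).map
        (fun k => (k, items.filter (fun t => pvKey t == k))) := by
  have hkeys : (items.foldl (fun d x => d.modify (pvKey x) [] (fun l => l ++ [x]))
      (PySem.Dict.empty : PySem.Dict (String × String) (List (String × Option String × String × Option String)))).keys
      = PySem.Set.update PySem.Dict.empty.keys (items.map pvKey) :=
    PySem.Dict.keys_foldl_modify_key items pvKey [] (fun _ x l => l ++ [x]) PySem.Dict.empty
  have hnd : (items.foldl (fun d x => d.modify (pvKey x) [] (fun l => l ++ [x]))
      (PySem.Dict.empty : PySem.Dict (String × String) (List (String × Option String × String × Option String)))).keys.Nodup :=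
    PySem.Dict.nodup_keys_foldl_modify_key items pvKey [] (fun _ x l => l ++ [x]) PySem.Dict.empty
      (by simp [PySem.Dict.keys_empty])
  have hgetD : ∀ k, (items.foldl (fun d x => d.modify (pvKey x) [] (fun l => l ++ [x]))
      (PySem.Dict.empty : PySem.Dict (String × String) (List (String × Option String × String × Option String)))).getD k []
      = items.filter (fun t => pvKey t == k) := by
    intro k
    have hmap : List.foldl (fun (d : PySem.Dict (String × String) (List (String × Option String × String × Option String))) x => d.modify (pvKey x) [] (fun l => l ++ [x])) PySem.Dict.empty items
        = List.foldl (fun d p => d.modify p.1 [] (fun l => l ++ [p.2])) PySem.Dict.empty (items.map (fun x => (pvKey x, x))) := by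
      rw [List.foldl_map]
    rw [hmap]
    rw [PySem.Dict.getD_foldl_modify_append, PySem.Dict.getD_empty, List.filter_map, List.map_map]
    simp only [Function.comp_def]
    exact List.map_id _
  rw [PySem.Dict.items_eq_map_keys _ hnd [], hkeys, PySem.Dict.keys_empty]
  exact List.map_congr_left (fun k _ => by rw [hgetD k])

-- ===== VERDICT (by name: the statement is the Claim_ definition above) =====
theorem group_schedules_by_date_venue_py_spec : Claim_equal_group_schedules_by_date_venue_py := by
  intro schedules _
  unfold Spec_group_schedules_by_date_venue_py group_schedules_by_date_venue_py group_schedules_by_date_venue_py_alt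
  rw [a_fold_eq, b_items_fold]
  simp only [List.nil_append]
  rw [dict_side (pvItems schedules), List.map_map]
  have hb : (pvItems schedules).foldl
      (fun ks (t : String × Option String × String × Option String) => PySem.Set.add ks (t.1, t.2.2.1)) []
      = PySem.Set.update [] ((pvItems schedules).map pvKey) :=
    List.foldl_map.symm
  rw [hb]
  exact List.map_congr_left (fun k _ => rfl)
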